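-- pv_equiv track=rewrite | github.com/joshman0077/coldemailtools | tools/score_domain_health.py | parse_warmup_by_email
-- ===== SOURCE A (Python) =====
-- from collections import defaultdict
--
-- def parse_warmup_by_email(warmup_data: list) -> dict:
--     """Parse warmup batches into per-email aggregated stats.
--
--     Warmup API returns: [{email_date_data: {email: {date: {sent, landed_inbox, landed_spam, received}}}}]
--     """
--     email_stats = defaultdict(lambda: {"sent": 0, "landed_inbox": 0, "landed_spam": 0, "received": 0, "days": 0})
--
--     if not warmup_data:
--         return {}
--
--     for batch in warmup_data:
--         if not isinstance(batch, dict):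
--             continue
--         edd = batch.get("email_date_data", {})
--         for email, dates in edd.items():
--             if not isinstance(dates, dict):
--                 continue
--             for date, day_stats in dates.items():
--                 if not isinstance(day_stats, dict):
--                     continue
--                 email_stats[email]["sent"] += day_stats.get("sent", 0) or 0
--                 email_stats[email]["landed_inbox"] += day_stats.get("landed_inbox", 0) or 0
--                 email_stats[email]["landed_spam"] += day_stats.get("landed_spam", 0) or 0
--                 email_stats[email]["received"] += day_stats.get("received", 0) or 0
--                 email_stats[email]["days"] += 1
--
--     return dict(email_stats)
-- ===== SOURCE B (Python) =====
-- def parse_warmup_by_email(warmup_data: list) -> dict: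
--     """Parse warmup batches into per-email aggregated stats (flatten, group, then aggregate)."""
--     pairs = [(email, day_stats)
--              for batch in warmup_data if isinstance(batch, dict)
--              for email, dates in batch.get("email_date_data", {}).items() if isinstance(dates, dict)
--              for day_stats in dates.values() if isinstance(day_stats, dict)]
--     groups = {}
--     for email, day_stats in pairs:
--         groups[email] = groups.get(email, []) + [day_stats]
--     return {email: {
--         "sent": sum(d.get("sent", 0) or 0 for d in lst),
--         "landed_inbox": sum(d.get("landed_inbox", 0) or 0 for d in lst),
--         "landed_spam": sum(d.get("landed_spam", 0) or 0 for d in lst),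
--         "received": sum(d.get("received", 0) or 0 for d in lst),
--         "days": len(lst),
--     } for email, lst in groups.items()}
-- ===== Notes on version B (the rewrite author's own statement) =====
-- stated objective: alternative
-- what changed: Replaces the single defaultdict pass that increments five counters inside triply-nested loops by a flatten-group-aggregate pipeline: a comprehension flattens the nesting into (email, day_stats) pairs, one dict pass groups the day_stats lists per email, and a final pass computes each email's four sums and day count.
import Mathlib
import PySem

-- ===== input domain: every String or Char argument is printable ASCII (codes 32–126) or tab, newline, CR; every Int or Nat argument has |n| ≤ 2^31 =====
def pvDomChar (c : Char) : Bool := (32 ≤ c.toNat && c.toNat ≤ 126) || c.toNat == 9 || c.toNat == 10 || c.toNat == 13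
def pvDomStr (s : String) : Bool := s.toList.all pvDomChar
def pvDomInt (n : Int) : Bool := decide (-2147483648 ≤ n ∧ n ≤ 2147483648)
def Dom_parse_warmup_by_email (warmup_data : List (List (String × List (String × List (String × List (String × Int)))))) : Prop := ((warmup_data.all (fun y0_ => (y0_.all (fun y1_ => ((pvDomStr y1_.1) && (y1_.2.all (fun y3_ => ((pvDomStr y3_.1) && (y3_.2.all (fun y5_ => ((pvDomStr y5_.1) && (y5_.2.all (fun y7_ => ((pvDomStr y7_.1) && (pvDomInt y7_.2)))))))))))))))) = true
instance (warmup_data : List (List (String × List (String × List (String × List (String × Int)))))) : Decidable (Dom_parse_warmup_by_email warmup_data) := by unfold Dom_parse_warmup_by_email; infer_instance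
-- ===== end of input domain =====

-- B re-implements parse_warmup_by_email by a different decomposition: flatten the nested structure
-- into a flat (email, day_stats) pair list, group the pairs per email in one dict pass, then compute
-- each email's sums/day-count in a single aggregation pass (objective: alternative, same cost).


-- ===== PORT A =====
-- the defaultdict default value {"sent": 0, "landed_inbox": 0, "landed_spam": 0, "received": 0, "days": 0}
def pvDayDefault : PySem.Dict String Int :=
  PySem.Dict.ofList [("sent", 0), ("landed_inbox", 0), ("landed_spam", 0), ("received", 0), ("days", 0)]

-- the body of A's innermost loop: the five 'email_stats[email][field] += …' statements.
-- 'email_stats[email]' on a defaultdict inserts the default on a missing key and the inner dict is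
-- updated in place, which is exactly Dict.modify with pvDayDefault as default.  The values here are
-- always Int, so Python's 'day_stats.get(f, 0) or 0' equals 'day_stats.get(f, 0)' ('x or 0' is x for
-- a nonzero int and 0 for 0); in Lean that is 'getD f 0'.
def pvStepA (stats : PySem.Dict String (PySem.Dict String Int)) (email : String)
    (day : List (String × Int)) : PySem.Dict String (PySem.Dict String Int) :=
  let d := PySem.Dict.ofList day
  let stats := stats.modify email pvDayDefault (fun inner => inner.modify "sent" 0 (· + d.getD "sent" 0))
  let stats := stats.modify email pvDayDefault (fun inner => inner.modify "landed_inbox" 0 (· + d.getD "landed_inbox" 0))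
  let stats := stats.modify email pvDayDefault (fun inner => inner.modify "landed_spam" 0 (· + d.getD "landed_spam" 0))
  let stats := stats.modify email pvDayDefault (fun inner => inner.modify "received" 0 (· + d.getD "received" 0))
  stats.modify email pvDayDefault (fun inner => inner.modify "days" 0 (· + 1))

-- A: early return {} on empty input, then the three nested 'for' loops accumulating into the
-- defaultdict, then dict(email_stats).  (The 'isinstance' guards are always true on the typed
-- domain: every batch / dates / day_stats value is a dict here.)
def parse_warmup_by_email (warmup_data : List (List (String × List (String × List (String × List (String × Int)))))) : List (String × List (String × Int)) :=
  if warmup_data = [] then []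
  else
    let stats := warmup_data.foldl (fun stats batch =>
      let edd := (PySem.Dict.ofList batch).getD "email_date_data" []
      (PySem.Dict.ofList edd).items.foldl (fun stats p =>
        (PySem.Dict.ofList p.2).items.foldl (fun stats q => pvStepA stats p.1 q.2) stats) stats)
      PySem.Dict.empty
    stats.items.map (fun p => (p.1, p.2.items))

-- ===== PORT B =====
-- the 'pairs' comprehension of B: flat list of (email, day_stats)
def pvPairs (warmup_data : List (List (String × List (String × List (String × List (String × Int)))))) : List (String × List (String × Int)) :=
  warmup_data.flatMap (fun batch =>
    (PySem.Dict.ofList ((PySem.Dict.ofList batch).getD "email_date_data" [])).items.flatMap (fun p =>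
      (PySem.Dict.ofList p.2).values.map (fun ds => (p.1, ds))))

-- sum(d.get(field, 0) or 0 for d in lst)  ('or 0' is the identity on Int values, see pvStepA)
def pvSumField (field : String) (lst : List (List (String × Int))) : Int :=
  (lst.map (fun d => (PySem.Dict.ofList d).getD field 0)).sum

-- the inner dict literal B builds for one email
def pvAggregate (lst : List (List (String × Int))) : List (String × Int) :=
  [("sent", pvSumField "sent" lst), ("landed_inbox", pvSumField "landed_inbox" lst),
   ("landed_spam", pvSumField "landed_spam" lst), ("received", pvSumField "received" lst),
   ("days", (lst.length : Int))]

-- B: group the pairs ('groups[email] = groups.get(email, []) + [day_stats]'), then aggregate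
def parse_warmup_by_email_alt (warmup_data : List (List (String × List (String × List (String × List (String × Int)))))) : List (String × List (String × Int)) :=
  let groups := (pvPairs warmup_data).foldl
    (fun g p => g.modify p.1 [] (· ++ [p.2])) PySem.Dict.empty
  groups.items.map (fun p => (p.1, pvAggregate p.2))

-- ===== PRECONDITION & SPEC =====
def Spec_parse_warmup_by_email (warmup_data : List (List (String × List (String × List (String × List (String × Int)))))) (out : List (String × List (String × Int))) : Prop := out = parse_warmup_by_email_alt warmup_data
instance (warmup_data : List (List (String × List (String × List (String × List (String × Int)))))) (out : List (String × List (String × Int))) : Decidable (Spec_parse_warmup_by_email warmup_data out) := by unfold Spec_parse_warmup_by_email; infer_instance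

-- ===== CLAIM (what is proved, stated in full; the proofs are below) =====
def Claim_equal_parse_warmup_by_email : Prop := ∀ (warmup_data : List (List (String × List (String × List (String × List (String × Int)))))), Dom_parse_warmup_by_email warmup_data → Spec_parse_warmup_by_email warmup_data (parse_warmup_by_email warmup_data)

-- ===== LEMMAS AND PROOFS =====

-- A's five in-place '+=' statements, as a function of the inner dict
def pvBump (inner : PySem.Dict String Int) (day : List (String × Int)) : PySem.Dict String Int :=
  let d := PySem.Dict.ofList day
  ((((inner.modify "sent" 0 (· + d.getD "sent" 0)).modify "landed_inbox" 0
      (· + d.getD "landed_inbox" 0)).modify "landed_spam" 0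
      (· + d.getD "landed_spam" 0)).modify "received" 0 (· + d.getD "received" 0)).modify "days" 0 (· + 1)

-- B's aggregate for one email, as a Dict (its .items is pvAggregate)
def pvAggD (lst : List (List (String × Int))) : PySem.Dict String Int :=
  PySem.Dict.mk [("sent", pvSumField "sent" lst), ("landed_inbox", pvSumField "landed_inbox" lst),
    ("landed_spam", pvSumField "landed_spam" lst), ("received", pvSumField "received" lst),
    ("days", (lst.length : Int))]

-- the simulation relation: A's accumulator is B's grouping dict with every list aggregated
def pvMapAgg (g : PySem.Dict String (List (List (String × Int)))) : PySem.Dict String (PySem.Dict String Int) :=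
  PySem.Dict.mk (g.items.map (fun p => (p.1, pvAggD p.2)))

lemma stepA_eq (s : PySem.Dict String (PySem.Dict String Int)) (e : String) (day : List (String × Int)) :
    pvStepA s e day = s.insert e (pvBump (s.getD e pvDayDefault) day) := by
  simp [pvStepA, pvBump, PySem.Dict.modify, PySem.Dict.getD_insert_self, PySem.Dict.insert_insert_self]

lemma aggD_nil : pvAggD [] = pvDayDefault := by decide

lemma bump_aggD (lst : List (List (String × Int))) (day : List (String × Int)) :
    pvBump (pvAggD lst) day = pvAggD (lst ++ [day]) := by
  simp [pvBump, pvAggD, pvSumField, PySem.Dict.modify, PySem.Dict.getD, PySem.Dict.get?,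
    PySem.Dict.insert]

lemma keys_mapAgg (g : PySem.Dict String (List (List (String × Int)))) :
    (pvMapAgg g).keys = g.keys := by
  simp [pvMapAgg, PySem.Dict.keys]

lemma contains_mapAgg (g : PySem.Dict String (List (List (String × Int)))) (e : String) :
    (pvMapAgg g).contains e = g.contains e := by
  rw [PySem.Dict.contains_eq_decide_mem_keys, PySem.Dict.contains_eq_decide_mem_keys, keys_mapAgg]

lemma nodup_keys_mapAgg (g : PySem.Dict String (List (List (String × Int)))) (hg : g.keys.Nodup) :
    (pvMapAgg g).keys.Nodup := by rw [keys_mapAgg]; exact hg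

lemma getD_mapAgg (g : PySem.Dict String (List (List (String × Int)))) (e : String)
    (hg : g.keys.Nodup) : (pvMapAgg g).getD e pvDayDefault = pvAggD (g.getD e []) := by
  by_cases h : g.contains e = true
  · rw [PySem.Dict.contains_eq_isSome_get?] at h
    obtain ⟨lst, hl⟩ := Option.isSome_iff_exists.mp h
    have hmem := PySem.Dict.mem_items_of_get?_eq_some g hl
    have hmem' : (e, pvAggD lst) ∈ (pvMapAgg g).items := by
      simp only [pvMapAgg]
      exact List.mem_map.mpr ⟨(e, lst), hmem, rfl⟩
    rw [PySem.Dict.getD_of_mem_items _ hmem' (nodup_keys_mapAgg g hg),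
        PySem.Dict.getD_of_get?_eq_some _ _ hl]
  · have hf : g.contains e = false := by simp_all
    have h' : (pvMapAgg g).contains e = false := by rw [contains_mapAgg]; exact hf
    rw [PySem.Dict.getD_of_not_contains _ _ h', PySem.Dict.getD_of_not_contains _ _ hf, aggD_nil]

lemma mapAgg_insert (g : PySem.Dict String (List (List (String × Int)))) (e : String)
    (v : List (List (String × Int))) :
    pvMapAgg (g.insert e v) = (pvMapAgg g).insert e (pvAggD v) := by
  apply PySem.Dict.ext
  by_cases h : g.contains e = true
  · rw [show ((pvMapAgg g).insert e (pvAggD v)).items = _ from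
        PySem.Dict.items_insert_of_contains _ _ (by rw [contains_mapAgg]; exact h)]
    simp only [pvMapAgg, PySem.Dict.items_insert_of_contains _ _ h, List.map_map]
    apply List.map_congr_left
    intro p _
    by_cases hpe : p.1 = e <;> simp [hpe]
  · have hf : g.contains e = false := by simp_all
    rw [show ((pvMapAgg g).insert e (pvAggD v)).items = _ from
        PySem.Dict.items_insert_of_not_contains _ _ (by rw [contains_mapAgg]; exact hf)]
    simp only [pvMapAgg, PySem.Dict.items_insert_of_not_contains _ _ hf, List.map_append,
      List.map_cons, List.map_nil]

lemma modify_append_eq_insert (g : PySem.Dict String (List (List (String × Int)))) (e : String)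
    (day : List (String × Int)) :
    g.modify e [] (· ++ [day]) = g.insert e (g.getD e [] ++ [day]) := by
  simp [PySem.Dict.modify]

-- A's fold simulates B's grouping fold through pvMapAgg
lemma fold_inv (ps : List (String × List (String × Int)))
    (g : PySem.Dict String (List (List (String × Int)))) (hg : g.keys.Nodup) :
    ps.foldl (fun s p => pvStepA s p.1 p.2) (pvMapAgg g)
      = pvMapAgg (ps.foldl (fun g p => g.modify p.1 [] (· ++ [p.2])) g) := by
  induction ps generalizing g with
  | nil => rfl
  | cons p t ih =>
    have hn : (g.modify p.1 [] (· ++ [p.2])).keys.Nodup := by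
      simpa using PySem.Dict.nodup_keys_foldl_modify_key [p]
        (fun q : String × List (String × Int) => q.1) [] (fun _ q => (· ++ [q.2])) g hg
    simp only [List.foldl_cons]
    rw [stepA_eq, getD_mapAgg _ _ hg, bump_aggD, ← mapAgg_insert, ← modify_append_eq_insert]
    exact ih _ hn

-- A's three nested loops are one fold over B's flat pair list
lemma foldA_pairs (warmup_data : List (List (String × List (String × List (String × List (String × Int))))))
    (s : PySem.Dict String (PySem.Dict String Int)) :
    warmup_data.foldl (fun stats batch =>
      let edd := (PySem.Dict.ofList batch).getD "email_date_data" []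
      (PySem.Dict.ofList edd).items.foldl (fun stats p =>
        (PySem.Dict.ofList p.2).items.foldl (fun stats q => pvStepA stats p.1 q.2) stats) stats) s
      = (pvPairs warmup_data).foldl (fun s p => pvStepA s p.1 p.2) s := by
  simp [pvPairs, List.foldl_flatMap, List.foldl_map, PySem.Dict.values]

-- ===== VERDICT (by name: the statement is the Claim_ definition above) =====
theorem parse_warmup_by_email_spec : Claim_equal_parse_warmup_by_email := by
  intro warmup_data _
  unfold Spec_parse_warmup_by_email parse_warmup_by_email parse_warmup_by_email_alt
  by_cases hw : warmup_data = []
  · subst hw; rfl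
  · simp only [hw, if_false]
    rw [foldA_pairs,
      show (PySem.Dict.empty : PySem.Dict String (PySem.Dict String Int)) = pvMapAgg PySem.Dict.empty from rfl,
      fold_inv _ _ (by simp [PySem.Dict.keys_empty])]
    simp only [pvMapAgg, List.map_map]
    rfl
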